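-- pv_equiv track=rewrite | github.com/Exevald/RSA | main.py | get_bigramms
-- ===== SOURCE A (Python) =====
-- def get_bigramms(text: str) -> list:
--     bigramms_list = []
--     if len(text) % 2 != 0:
--         text += ' '
--     for i in range(0, len(text), 2):
--         ch1, ch2 = text[i], text[i + 1]
--         bigramm = ch1 + ch2
--         bigramms_list.append(bigramm)
--     return bigramms_list
-- ===== SOURCE B (Python) =====
-- def get_bigramms(text: str) -> list:
--     it = iter(text)
--     return [ch1 + next(it, ' ') for ch1 in it]
-- ===== Notes on version B (the rewrite author's own statement) =====
-- stated objective: idiomatic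
-- what changed: Drops the length-parity padding and the index loop entirely: a single iterator over the text is consumed pairwise (the next() default supplies the pad space for a trailing odd character), so there is no length test, no index arithmetic and no element lookup.
import Mathlib
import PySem

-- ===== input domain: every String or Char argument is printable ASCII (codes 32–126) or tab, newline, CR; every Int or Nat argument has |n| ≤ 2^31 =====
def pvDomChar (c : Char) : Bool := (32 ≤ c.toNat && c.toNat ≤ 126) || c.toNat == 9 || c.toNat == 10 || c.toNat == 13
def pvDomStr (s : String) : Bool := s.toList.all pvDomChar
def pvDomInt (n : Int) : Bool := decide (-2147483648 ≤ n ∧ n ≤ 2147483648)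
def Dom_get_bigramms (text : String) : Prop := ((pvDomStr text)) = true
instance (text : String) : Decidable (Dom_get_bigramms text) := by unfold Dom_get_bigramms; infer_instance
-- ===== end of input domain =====

-- B drops A's padding step and index loop: one pass over the characters consumed
-- pairwise, with a space supplied when a trailing odd character has no partner
-- (objective: idiomatic).

-- ===== PORT A =====
def get_bigramms (text : String) : List String :=
  let cs0 := text.toList
  -- if len(text) % 2 != 0: text += ' '
  let cs := if cs0.length % 2 ≠ 0 then cs0 ++ [' '] else cs0
  -- for i in range(0, len(text), 2): bigramms_list.append(text[i] + text[i+1])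
  -- i and i+1 are always in range here, so pyGet?'s none branch is unreachable; getD supplies a dummy
  (PySem.List.pyRange 0 cs.length 2).foldl
    (fun acc i =>
      acc ++ [String.mk [(PySem.List.pyGet? cs i).getD ' ', (PySem.List.pyGet? cs (i+1)).getD ' ']]) []

-- ===== PORT B =====
-- the iterator consumed pairwise: 'for ch1 in it' takes one char, 'next(it, " ")'
-- takes the next char or yields the pad space when the iterator is exhausted
def pvPairs : List Char → List String
  | [] => []
  | [a] => [String.mk [a, ' ']]
  | a :: b :: rest => String.mk [a, b] :: pvPairs rest

def get_bigramms_alt (text : String) : List String := pvPairs text.toList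

-- ===== PRECONDITION & SPEC =====
def Spec_get_bigramms (text : String) (out : List String) : Prop := out = get_bigramms_alt text
instance (text : String) (out : List String) : Decidable (Spec_get_bigramms text out) := by unfold Spec_get_bigramms; infer_instance

-- ===== CLAIM (what is proved, stated in full; the proofs are below) =====
def Claim_equal_get_bigramms : Prop := ∀ (text : String), Dom_get_bigramms text → Spec_get_bigramms text (get_bigramms text)

-- ===== LEMMAS AND PROOFS =====

-- A's padding step, named for the proofs only
def pvPad (cs : List Char) : List Char := if cs.length % 2 ≠ 0 then cs ++ [' '] else cs

-- the common closed-form description both ports are reduced to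
def pvPairsSpec (cs : List Char) : List String :=
  (List.range ((cs.length + 1) / 2)).map
    (fun k => String.mk [cs.getD (2 * k) ' ', cs.getD (2 * k + 1) ' '])

-- appending the padding space does not change any getD-with-space lookup
theorem pv_getD_pad (cs : List Char) (i : Nat) :
    (cs ++ [' ']).getD i ' ' = cs.getD i ' ' := by
  rcases lt_trichotomy i cs.length with h | h | h
  · rw [List.getD_eq_getElem _ _ (by simp; omega), List.getD_eq_getElem _ _ h,
      List.getElem_append_left h]
  · rw [List.getD_eq_getElem _ _ (by simp; omega), List.getD_eq_default _ _ (by omega)]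
    simp [List.getElem_append_right (by omega : cs.length ≤ i), h]
  · rw [List.getD_eq_default _ _ (by simp; omega), List.getD_eq_default _ _ (by omega)]

-- B's pairwise recursion computes the closed form
theorem pvPairs_eq (cs : List Char) : pvPairs cs = pvPairsSpec cs := by
  induction cs using pvPairs.induct with
  | case1 => simp [pvPairs, pvPairsSpec]
  | case2 a => simp [pvPairs, pvPairsSpec, List.range_one]
  | case3 a b rest ih =>
    have hlen : (((a :: b :: rest).length + 1) / 2) = ((rest.length + 1) / 2) + 1 := by
      simp; omega
    rw [pvPairs, ih]
    unfold pvPairsSpec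
    rw [hlen, List.range_succ_eq_map, List.map_cons, List.map_map]
    congr 1

-- A's fold over range(0, len, 2) on an even-length list computes the same map
theorem pv_stepA (cs : List Char) (m : Nat) (h : cs.length = 2 * m) :
    (PySem.List.pyRange 0 cs.length 2).foldl
      (fun acc i =>
        acc ++ [String.mk [(PySem.List.pyGet? cs i).getD ' ', (PySem.List.pyGet? cs (i+1)).getD ' ']]) []
    = (List.range m).map
        (fun k => String.mk [cs.getD (2 * k) ' ', cs.getD (2 * k + 1) ' ']) := by
  rw [PySem.List.pyRange_of_pos 0 cs.length (by norm_num)]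
  rw [PySem.List.foldl_append_singleton_eq_map]
  rw [List.map_map]
  have hc : (if (0:ℤ) < cs.length then (((cs.length:ℤ) - 0 + 2 - 1) / 2).toNat else 0) = m := by
    rw [h]; push_cast; split_ifs with hpos <;> omega
  rw [hc, List.nil_append]
  apply List.map_congr_left
  intro k hk
  simp only [List.mem_range] at hk
  simp only [Function.comp]
  have h0 : PySem.List.pyGet? cs ((0:ℤ) + 2 * (k:ℤ)) = some (cs.getD (2*k) ' ') := by
    rw [show ((0:ℤ) + 2 * (k:ℤ)) = ((2*k : Nat) : ℤ) by push_cast; ring,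
      PySem.List.pyGet?_natCast, List.getElem?_eq_getElem (by omega : 2*k < cs.length),
      List.getD_eq_getElem _ _ (by omega : 2*k < cs.length)]
  have h1 : PySem.List.pyGet? cs ((0:ℤ) + 2 * (k:ℤ) + 1) = some (cs.getD (2*k+1) ' ') := by
    rw [show ((0:ℤ) + 2 * (k:ℤ) + 1) = ((2*k+1 : Nat) : ℤ) by push_cast; ring,
      PySem.List.pyGet?_natCast, List.getElem?_eq_getElem (by omega : 2*k+1 < cs.length),
      List.getD_eq_getElem _ _ (by omega : 2*k+1 < cs.length)]
  rw [h0, h1]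
  simp

-- the closed form is unchanged by A's padding
theorem pv_spec_pad (cs : List Char) : pvPairsSpec (pvPad cs) = pvPairsSpec cs := by
  unfold pvPad
  split_ifs with hodd
  · unfold pvPairsSpec
    have hlen : (((cs ++ [' ']).length + 1) / 2) = ((cs.length + 1) / 2) := by
      simp; omega
    rw [hlen]
    apply List.map_congr_left
    intro k _
    rw [pv_getD_pad, pv_getD_pad]
  · rfl

-- ===== VERDICT (by name: the statement is the Claim_ definition above) =====
theorem get_bigramms_spec : Claim_equal_get_bigramms := by
  intro text _
  show Spec_get_bigramms text (get_bigramms text)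
  unfold Spec_get_bigramms get_bigramms get_bigramms_alt
  simp only []
  set cs := text.toList with hcs
  have hA :
      (if cs.length % 2 ≠ 0 then cs ++ [' '] else cs) = pvPad cs := rfl
  rw [hA, pvPairs_eq, ← pv_spec_pad]
  have heven : (pvPad cs).length % 2 = 0 := by
    unfold pvPad; split_ifs with hodd
    · simp; omega
    · omega
  obtain ⟨m, hm⟩ : ∃ m, (pvPad cs).length = 2 * m := ⟨(pvPad cs).length / 2, by omega⟩
  rw [pv_stepA (pvPad cs) m hm]
  unfold pvPairsSpec
  have hmm : ((pvPad cs).length + 1) / 2 = m := by omega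
  rw [hmm]
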